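-- pv_equiv track=rewrite | github.com/Huzaifa045/Python | Name Frequency Project/BB3.py | get_name_data
-- ===== SOURCE A (Python) =====
-- def get_name_data(name: str, names_dict: dict) -> tuple:
--     """
--     Purpose: Get the data for the specified name from the dictionary.
--     Parameters:
--         name: str - the name to search for
--         names_dict: dict - the dictionary containing baby names data
--     Returns: tuple - two lists containing the frequency data for boys and girls
--     """
--     boys_data = []
--     girls_data = []
--     for year in range(1980, 2021 + 1):
--         boys_freq = 0
--         girls_freq = 0
--         if name in names_dict:
--             for entry in names_dict[name]:
--                 if entry[2] == year:
--                     if entry[1] == 'Boy':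
--                         boys_freq = entry[0]
--                     elif entry[1] == 'Girl':
--                         girls_freq = entry[0]
--         boys_data.append(boys_freq)
--         girls_data.append(girls_freq)
--     return boys_data, girls_data
-- ===== SOURCE B (Python) =====
-- def get_name_data(name: str, names_dict: dict) -> tuple:
--     boys = {}
--     girls = {}
--     for entry in names_dict.get(name, []):
--         if entry[1] == 'Boy':
--             boys[entry[2]] = entry[0]
--         elif entry[1] == 'Girl':
--             girls[entry[2]] = entry[0]
--     years = range(1980, 2021 + 1)
--     return [boys.get(y, 0) for y in years], [girls.get(y, 0) for y in years]
-- ===== Notes on version B (the rewrite author's own statement) =====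
-- stated objective: alternative
-- what changed: One pass over the name's entries bucketing frequencies into per-year boy/girl dicts (later entries overwrite, matching A's last-assignment-wins), then one read per year, instead of rescanning all of the name's entries for each of the 42 years.
import Mathlib
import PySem

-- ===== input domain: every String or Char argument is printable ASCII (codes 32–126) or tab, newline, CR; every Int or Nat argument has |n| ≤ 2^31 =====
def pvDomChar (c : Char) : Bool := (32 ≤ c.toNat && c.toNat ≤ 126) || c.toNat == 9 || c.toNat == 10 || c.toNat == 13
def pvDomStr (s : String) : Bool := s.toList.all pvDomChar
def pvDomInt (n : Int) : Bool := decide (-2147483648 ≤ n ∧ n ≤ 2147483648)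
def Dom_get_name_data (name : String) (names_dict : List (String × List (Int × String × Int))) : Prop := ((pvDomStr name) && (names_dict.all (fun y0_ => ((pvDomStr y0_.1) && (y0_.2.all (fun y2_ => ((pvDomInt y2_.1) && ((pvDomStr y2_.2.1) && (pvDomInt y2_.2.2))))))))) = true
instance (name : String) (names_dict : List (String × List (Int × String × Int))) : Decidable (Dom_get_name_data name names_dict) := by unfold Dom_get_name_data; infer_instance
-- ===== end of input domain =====

-- B replaces A's per-year rescan of the name's entries by one bucketing pass into per-year
-- boy/girl dicts plus one read per year (an alternative algorithm); proved to return the same value.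

-- ===== PORT A =====
-- first-match association lookup = Python dict lookup under the type convention
def pvLookup (d : List (String × List (Int × String × Int))) (k : String) : Option (List (Int × String × Int)) :=
  (d.find? (fun p => p.1 == k)).map (·.2)

-- literal port of A: for each year 1980..2021, rescan the name's entries, last match wins
def get_name_data (name : String) (names_dict : List (String × List (Int × String × Int))) : List Int × List Int :=
  (PySem.List.pyRange 1980 2022 1).foldl (fun (acc : List Int × List Int) year =>
    let fr : Int × Int :=
      match pvLookup names_dict name with
      | some entries =>
          entries.foldl (fun (bg : Int × Int) e =>
            if e.2.2 == year then
              if e.2.1 == "Boy" then (e.1, bg.2)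
              else if e.2.1 == "Girl" then (bg.1, e.1)
              else bg
            else bg) ((0 : Int), (0 : Int))
      | none => ((0 : Int), (0 : Int))
    (acc.1 ++ [fr.1], acc.2 ++ [fr.2])) ([], [])

-- ===== PORT B =====
-- literal port of B: one pass bucketing frequencies into per-year boy/girl dicts, then one read per year
def get_name_data_alt (name : String) (names_dict : List (String × List (Int × String × Int))) : List Int × List Int :=
  let entries := (pvLookup names_dict name).getD []
  let bg := entries.foldl (fun (p : PySem.Dict Int Int × PySem.Dict Int Int) e =>
      if e.2.1 == "Boy" then (p.1.insert e.2.2 e.1, p.2)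
      else if e.2.1 == "Girl" then (p.1, p.2.insert e.2.2 e.1)
      else p) (PySem.Dict.empty, PySem.Dict.empty)
  ((PySem.List.pyRange 1980 2022 1).map (fun y => bg.1.getD y 0),
   (PySem.List.pyRange 1980 2022 1).map (fun y => bg.2.getD y 0))

-- ===== PRECONDITION & SPEC =====
def Spec_get_name_data (name : String) (names_dict : List (String × List (Int × String × Int))) (out : List Int × List Int) : Prop := out = get_name_data_alt name names_dict
instance (name : String) (names_dict : List (String × List (Int × String × Int))) (out : List Int × List Int) : Decidable (Spec_get_name_data name names_dict out) := by unfold Spec_get_name_data; infer_instance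

-- ===== CLAIM (what is proved, stated in full; the proofs are below) =====
def Claim_equal_get_name_data : Prop := ∀ (name : String) (names_dict : List (String × List (Int × String × Int))), Dom_get_name_data name names_dict → Spec_get_name_data name names_dict (get_name_data name names_dict)


-- ===== LEMMAS AND PROOFS =====

-- appending per-year results on both components = mapping the per-year function over the years
theorem pvFoldAppend (h : Int → Int × Int) (L : List Int) (xs ys : List Int) :
    L.foldl (fun (acc : List Int × List Int) y => (acc.1 ++ [(h y).1], acc.2 ++ [(h y).2])) (xs, ys)
      = (xs ++ L.map (fun y => (h y).1), ys ++ L.map (fun y => (h y).2)) := by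
  induction L generalizing xs ys with
  | nil => simp
  | cons a L ih => simp [List.foldl, ih]

-- A's per-year rescan (last assignment wins) reads off B's bucket dicts at that year
theorem pvInner (y : Int) (entries : List (Int × String × Int)) :
    ∀ (b g : Int) (B G : PySem.Dict Int Int), B.getD y 0 = b → G.getD y 0 = g →
    (entries.foldl (fun (p : PySem.Dict Int Int × PySem.Dict Int Int) e =>
        if e.2.1 == "Boy" then (p.1.insert e.2.2 e.1, p.2)
        else if e.2.1 == "Girl" then (p.1, p.2.insert e.2.2 e.1)
        else p) (B, G)).1.getD y 0
      = (entries.foldl (fun (bg : Int × Int) e =>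
          if e.2.2 == y then
            if e.2.1 == "Boy" then (e.1, bg.2)
            else if e.2.1 == "Girl" then (bg.1, e.1)
            else bg
          else bg) (b, g)).1
    ∧ (entries.foldl (fun (p : PySem.Dict Int Int × PySem.Dict Int Int) e =>
        if e.2.1 == "Boy" then (p.1.insert e.2.2 e.1, p.2)
        else if e.2.1 == "Girl" then (p.1, p.2.insert e.2.2 e.1)
        else p) (B, G)).2.getD y 0
      = (entries.foldl (fun (bg : Int × Int) e =>
          if e.2.2 == y then
            if e.2.1 == "Boy" then (e.1, bg.2)
            else if e.2.1 == "Girl" then (bg.1, e.1)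
            else bg
          else bg) (b, g)).2 := by
  induction entries with
  | nil => intro b g B G hB hG; simp [hB, hG]
  | cons e rest ih =>
    intro b g B G hB hG
    obtain ⟨f, gen, yr⟩ := e
    simp only [List.foldl]
    by_cases hBoy : gen = "Boy"
    · subst hBoy
      by_cases hy : yr = y
      · subst hy
        simp only [beq_self_eq_true, if_true]
        exact ih f g _ _ (by simp [PySem.Dict.getD_insert_self]) hG
      · have hyb : (yr == y) = false := by simpa using hy
        simp only [beq_self_eq_true, if_true, hyb, Bool.false_eq_true, if_false]
        exact ih b g _ _ (by rw [PySem.Dict.getD_insert]; simp [Ne.symm hy, hB]) hG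
    · have hBoyb : (gen == "Boy") = false := by simpa using hBoy
      by_cases hGirl : gen = "Girl"
      · subst hGirl
        by_cases hy : yr = y
        · subst hy
          simp only [beq_self_eq_true, if_true, hBoyb, Bool.false_eq_true, if_false]
          exact ih b f _ _ hB (by simp [PySem.Dict.getD_insert_self])
        · have hyb : (yr == y) = false := by simpa using hy
          simp only [beq_self_eq_true, if_true, hBoyb, hyb, Bool.false_eq_true, if_false]
          exact ih b g _ _ hB (by rw [PySem.Dict.getD_insert]; simp [Ne.symm hy, hG])
      · have hGirlb : (gen == "Girl") = false := by simpa using hGirl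
        simp only [hBoyb, hGirlb, Bool.false_eq_true, if_false, ite_self]
        exact ih b g _ _ hB hG

-- ===== VERDICT (by name: the statement is the Claim_ definition above) =====
theorem get_name_data_spec : Claim_equal_get_name_data := by
  intro name names_dict _
  unfold Spec_get_name_data get_name_data get_name_data_alt
  cases hlk : pvLookup names_dict name with
  | none =>
      simp only [Option.getD_none]
      rw [pvFoldAppend (fun _ => ((0 : Int), (0 : Int)))]
      simp [PySem.Dict.getD_empty]
  | some entries =>
      simp only [Option.getD_some]
      rw [pvFoldAppend (fun year =>
        entries.foldl (fun (bg : Int × Int) e =>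
            if e.2.2 == year then
              if e.2.1 == "Boy" then (e.1, bg.2)
              else if e.2.1 == "Girl" then (bg.1, e.1)
              else bg
            else bg) ((0 : Int), (0 : Int)))]
      have h := fun y => pvInner y entries 0 0 PySem.Dict.empty PySem.Dict.empty
        (PySem.Dict.getD_empty _ _) (PySem.Dict.getD_empty _ _)
      refine Prod.ext ?_ ?_
      · exact (List.map_congr_left (fun y _ => (h y).1)).symm
      · exact (List.map_congr_left (fun y _ => (h y).2)).symm
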